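/- PORTED by tools/port_fixed.py from Prog/Jsmn/S/StrInv.lean to THE FIXED IMAGE fixed/jsmn_s.bin (same bytes at the same addresses; binFS). Do not edit: edit the original and port again. -/
/-
  jsmn_s.bin (-DJSMN_STRICT -DJSMN_PARENT_LINKS): `jsmn_parse_string` (341 bytes at 100154H, 111 instructions, two loops, two calls) — THE CUT POINTS
  AND THE STATE PREDICATES AT THEM. (The same code as in Prog/Jsmn/D/StrInv.lean, with three pushes and 20-byte tokens.)

  REGISTERS after the prologue (100154H – 10016BH: push r12, push rbp, push rbx): rbx = parser, rdi = js, rsi = len, r9 = tokens, r8 = num_tokens,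
  ebp = start (= parser->pos on entry, zero-extended); r12 is free (it holds the token pointer after the allocation); rsp = sp0 - 18H where sp0 = rsp on entry;
  the saved r12 at sp0-8, the saved rbp at sp0-10H, the saved rbx at sp0-18H. `parser->pos` lives in memory ([rbx]) and is stored on every change.

  CUT POINTS
    100228H  OUTER LOOP HEAD  the string body; the model's `strScan` from the position in [rbx]
    100221H  `parser->pos++`  every `break` / fall-through of the body lands here
    10024FH  a backslash with `pos + 1 < len`: ecx = eax = pos + 1, about to be stored
    1001D7H  INNER LOOP HEAD  the up-to-4 hex digits after `\u`; ecx = i; the model's `hexScan` with 4 - i digits to go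
    100170H  the closing quote
    1001CAH  `return r`: r in eax; pop rbx, pop rbp, pop r12, ret (every `return` lands here)

  COUNTING MODE (tokens == NULL): the contract gives `tb = 0` and no `Region` for the token array (`Env.toksR : tb = 0 ∨ Region …`): the regions that do not
  touch the array use `ScanPre.toksW` (open it next to `hp`: `have hW := hp.toksW; v3_open hp hf hW`), the two call sites `ScanPre.toksRegion`.
-/
import Prog.Jsmn.Fixed.Specs
import Prog.Jsmn.State
import Prog.Jsmn.Fixed.CodeFS
import X86.Derived.Prog.MemWords
import X86.Derived.Prog.Reach

namespace X86
namespace J6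
namespace FS
namespace Str
open X86.User (CodeAt RegsKept Span FlagsOK Layout toNat_add_ofNat toNat_ofNat_lt' add_ofNat_add)
open Jsmn JsmnFSBytes

set_option linter.unusedVariables false

/-- The constants of one call of jsmn_parse_string. -/
structure SCtx where
  ret : Word
  pa : Word
  jsA : Word
  tb : Word
  js : List UInt8
  numTokens : Nat
  /-- the parser state and the tokens argument on entry -/
  p : Parser
  toks : Option Tokens

/-- The number of bytes of the token array. -/
def SCtx.tlen (c : SCtx) : Nat := toksBytes Config.strictLinks c.numTokens c.toks

/-- What jsmn_parse_string was called with (the hypotheses of `StrSpec`, bundled). -/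
structure Entry (c : SCtx) (n : User.Layout) (v0 : User.State) : Prop where
  pre : ScanPre binFS n binFS.str binFS.useStr v0 c.ret c.pa c.jsA c.tb c.js c.numTokens c.p c.toks
  r8 : v0.reg .r8 = UInt64.ofNat c.numTokens

/-- What holds from the prologue to the epilogue: the stack frame (three saved registers, the return address), what memory may have changed, and
the parser / tokens in memory = `pp` / `tk`. -/
structure Core (c : SCtx) (n : User.Layout) (v0 v : User.State) (pp : Parser) (tk : Option Tokens) : Prop where
  rsp : v.reg .rsp = v0.reg .rsp - 0x18
  kept : RegsKept [.rax, .rcx, .rdx, .rbx, .rsp, .rbp, .rsi, .rdi, .r8, .r9, .r10, .r11, .r12, .r16, .r17, .r18, .r19, .r20, .r21, .r22, .r23, .r24, .r25,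
    .r26, .r27, .r28, .r29, .r30, .r31] v0 v
  sv12 : v.mem.readLE (v0.reg .rsp - 0x8) 8 = (v0.reg .r12).toNat
  svbp : v.mem.readLE (v0.reg .rsp - 0x10) 8 = (v0.reg .rbp).toNat
  svbx : v.mem.readLE (v0.reg .rsp - 0x18) 8 = (v0.reg .rbx).toNat
  retA : UInt64.ofNat (v.mem.readLE (v0.reg .rsp) 8) = c.ret
  same : SameOutside v0.mem v.mem (((v0.reg .rsp).toNat - 32, (v0.reg .rsp).toNat) :: dataWins c.pa c.tb c.tlen)
  code : CodeAt v.mem 0x100154 jsmn_parse_string_bytes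
  parser : ParserAt v.mem c.pa pp
  toksArg : ToksArg Config.strictLinks v.mem c.tb c.numTokens tk

/-- Inside the scanning loops: `Core` with `parser->pos = q` (nothing else has changed yet) + the registers that hold the arguments + the text. -/
structure Frame (c : SCtx) (n : User.Layout) (v0 v : User.State) (q : Nat) : Prop where
  core : Core c n v0 v { c.p with pos := q } c.toks
  rbx : v.reg .rbx = c.pa
  rdi : v.reg .rdi = c.jsA
  rsi : v.reg .rsi = UInt64.ofNat c.js.length
  r9 : v.reg .r9 = c.tb
  r8 : v.reg .r8 = UInt64.ofNat c.numTokens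
  rbp : v.reg .rbp = UInt64.ofNat c.p.pos
  text : CodeAt v.mem c.jsA c.js

/-- At a cut point `addr` inside the loops, with `parser->pos = q`. -/
def At (c : SCtx) (n : User.Layout) (v0 v : User.State) (addr : Word) (q : Nat) : Prop := v.rip = addr ∧ Frame c n v0 v q

/-- About to return `r` (1001CAH), the parser and the tokens in memory being `pp` and `tk`. -/
def AtRet (c : SCtx) (n : User.Layout) (v0 v : User.State) (r : Int) (pp : Parser) (tk : Option Tokens) : Prop :=
  v.rip = 0x1001ca ∧ Core c n v0 v pp tk ∧ v.reg .rax = UInt64.ofNat (u32 r)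

/-! ### Characters of the text, as the machine reads them -/

/-- `js[i]` as a one-byte load. -/
theorem char_read {μ : User.Mem} {jsA : Word} {js : List UInt8} (h : CodeAt μ jsA js) (i : Nat) (hi : i < js.length) :
    μ.readLE (jsA + UInt64.ofNat i) 1 = (charAt js i).toNat := by
  rw [User.Mem.readLE_one', h i hi]
  simp [charAt, hi]

theorem more_true {js : List UInt8} {q : Nat} (h1 : q < js.length) (h2 : (charAt js q).toNat ≠ 0) : more js q = true := by
  have : charAt js q ≠ 0 := fun h => h2 (by rw [h]; rfl)
  simp [more, h1, this]

theorem more_false_len {js : List UInt8} {q : Nat} (h1 : js.length ≤ q) : more js q = false := by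
  simp [more, Nat.not_lt.mpr h1]

theorem more_false_nul {js : List UInt8} {q : Nat} (h2 : (charAt js q).toNat = 0) : more js q = false := by
  have : charAt js q = 0 := UInt8.toNat_inj.mp h2
  simp [more, this]

theorem u32_succ (q : Nat) : u32 ((q : Int) + 1) = (q + 1) % 4294967296 := by unfold u32; omega
theorem u32_pred (q : Nat) : u32 ((q : Int) - 1) = (q + 4294967295) % 4294967296 := by unfold u32; omega

theorem u32_nomem : UInt64.ofNat (u32 JSMN_ERROR_NOMEM) = 4294967295 := by decide
theorem u32_inval : UInt64.ofNat (u32 JSMN_ERROR_INVAL) = 4294967294 := by decide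
theorem u32_part : UInt64.ofNat (u32 JSMN_ERROR_PART) = 4294967293 := by decide
theorem u32_zero : UInt64.ofNat (u32 0) = 0 := by decide

/-- The tokens argument, moved to a memory that agrees on the array. -/
theorem toksArg_frame {cfg : Jsmn.Config} {μ ν : User.Mem} {tb : Word} {numTokens : Nat} {tk : Option Tokens} (h : ToksArg cfg μ tb numTokens tk)
    (he : User.Mem.EqOn tb.toNat (tb.toNat + toksBytes cfg numTokens tk) μ ν) (hlt : tb.toNat + toksBytes cfg numTokens tk < 2 ^ 64) :
    ToksArg cfg ν tb numTokens tk := by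
  cases tk with
  | none => exact h
  | some ts =>
    obtain ⟨h0, hl, ht⟩ := h
    simp only [toksBytes] at he hlt
    exact ⟨h0, hl, ht.frame (by rw [hl]; exact he) (by rw [hl]; exact hlt)⟩

/-- The token array of this configuration (20-byte tokens), moved to a memory that agrees on it: `TokensAt.frame` with the size as a literal. -/
theorem tokensAt_frame20 {μ ν : User.Mem} {tb : Word} {ts : Tokens} (h : TokensAt Config.strictLinks μ tb ts)
    (he : User.Mem.EqOn tb.toNat (tb.toNat + 20 * ts.length) μ ν) (hlt : tb.toNat + 20 * ts.length < 2 ^ 64) : TokensAt Config.strictLinks ν tb ts :=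
  h.frame he hlt

/-- A caller's data region is a data region of its callee (whose stack lies below the caller's window). -/
theorem region_callee {b : Bin} {n : User.Layout} {v0 v1 : User.State} {use : Nat} {a : Word} {len : Nat} (h : Region b n v0 use a len)
    (h1 : (v1.reg .rsp).toNat + 8 ≤ (v0.reg .rsp).toNat) (h2 : (v0.reg .rsp).toNat - use ≤ (v1.reg .rsp).toNat) : Region b n v1 0 a len :=
  ⟨h.lo, h.hi, h.img, by have := h.stk; omega⟩

end Str
end FS
end J6
end X86

set_option hygiene false in
/-- The end of a region inside the loops: `Frame c n v0 <setter nest over v> q'` from the opened frame `hf` at `v` (`v3_open hf`); what is left is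
the goal `<memory>.readLE c.pa 4 = q'`. -/
macro "strs_frame_f" : tactic => `(tactic|
  (refine ⟨⟨by (v3_regnorm; exact hf_core_rsp), by v3_kept, by v3_frame hf_core_sv12, by v3_frame hf_core_svbp, by v3_frame hf_core_svbx, by v3_frame hf_core_retA,
      by (unfold dataWins SCtx.tlen at *; v3_same), by v3_frame hf_core_code,
      ⟨?_, by v3_frame hf_core_parser_toknext, by v3_frame hf_core_parser_toksuper⟩, by (unfold SCtx.tlen at *; v3_frame hf_core_toksArg)⟩,
    by (v3_regnorm; exact hf_rbx), by (v3_regnorm; exact hf_rdi), by (v3_regnorm; exact hf_rsi), by (v3_regnorm; exact hf_r9), by (v3_regnorm; exact hf_r8),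
    by (v3_regnorm; exact hf_rbp), by v3_frame hf_text⟩))

set_option hygiene false in
/-- With a token array (`hs : c.toks = some ts0`, the opened `hf_core : Core … (some ts)`, and `hp.toksRegion` opened as `hR`: `have hp' := hp; rw [hs] at hp';
have hR := hp'.toksRegion; v3_open hp hf hR`): the array's size as `20 * c.numTokens` in the disjointness facts and the footprint; `ToksArg` split into
`htb0 : c.tb ≠ 0`, `htslen : ts.length = c.numTokens`, `htoks : TokensAt …`. -/
macro "strs_some_f" : tactic => `(tactic|
  (simp only [dataWins, SCtx.tlen, hs, toksBytes, ToksArg, tokSize_strictLinks] at hf_core_same hf_core_toksArg hp_env_parserToks hp_env_jsToks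
   obtain ⟨htb0, htslen, htoks⟩ := hf_core_toksArg))

set_option hygiene false in
/-- An error exit: `AtRet c n v0 <setter nest over v> r c.p c.toks` from the opened frame `hf` at `v`, after `mov [rbx], ebp ; mov eax, r`
(needs `hpos : c.p.pos < 2 ^ 32` in the context). -/
macro "strs_fail_f" : tactic => `(tactic|
  (refine ⟨by simp, ⟨by (v3_regnorm; exact hf_core_rsp), by v3_kept, by v3_frame hf_core_sv12, by v3_frame hf_core_svbp, by v3_frame hf_core_svbx, by v3_frame hf_core_retA,
      by (unfold dataWins SCtx.tlen at *; v3_same), by v3_frame hf_core_code,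
      ⟨by v3_read, by v3_frame hf_core_parser_toknext, by v3_frame hf_core_parser_toksuper⟩, by (unfold SCtx.tlen at *; v3_frame hf_core_toksArg)⟩,
    by (v3_regnorm; first | exact u32_inval.symm | exact u32_part.symm | exact u32_nomem.symm)⟩))

macro_rules
  | `(tactic| v3_frame_rule $h) => `(tactic| first
    | (with_reducible refine X86.J6.FS.Str.toksArg_frame $h ?eqon ?side)
    | (with_reducible refine X86.J6.FS.Str.tokensAt_frame20 $h ?eqon ?side))
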